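-- pv_equiv track=rewrite | github.com/Durgaprasad-kakarla/Geeks-for-Geeks | Difficulty: Medium/Print leaf nodes from preorder traversal of BST/print-leaf-nodes-from-preorder-traversal-of-bst.py | leafNodes
-- ===== SOURCE A (Python) =====
-- def leafNodes(preorder):
-- 	# code here
-- 	n=len(preorder)
-- 	def func(start,end):
-- 	    if start>end:
-- 	        return
-- 	    if start==end:
-- 	        ans.append(preorder[start])
-- 	        return
-- 	    left=start+1
-- 	    while left<n and preorder[start]>preorder[left]:
-- 	        left+=1
-- 	    if left!=start+1:
-- 	        func(start+1,left-1)
-- 	    func(left,end)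
-- 	ans=[]
-- 	func(0,n-1)
-- 	return ans
-- ===== SOURCE B (Python) =====
-- def leafNodes(preorder):
--     # One-pass stack algorithm: the stack holds the current root-to-node chain as
--     # (value, has_child) pairs; an element >= the top closes finished subtrees by
--     # popping, and the first-popped node is a leaf iff it is childless and not the
--     # single popped node (which receives the new element as its right child).
--     ans = []
--     st = []  # list of (value, has_child), top at the end
--     for x in preorder:
--         if st and st[-1][0] <= x:
--             v, hc = st.pop()
--             cnt = 1
--             while st and st[-1][0] <= x:
--                 st.pop()
--                 cnt += 1
--             if cnt > 1 and not hc: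
--                 ans.append(v)
--         else:
--             if st:
--                 st[-1] = (st[-1][0], True)
--         st.append((x, False))
--     if st and not st[-1][1]:
--         ans.append(st[-1][0])
--     return ans
-- ===== Notes on version B (the rewrite author's own statement) =====
-- stated objective: faster
-- what changed: Replaced A's recursive segment-splitting (each node rescans its whole left subtree to find the split point, and recursion depth can reach n) with a single left-to-right pass over the preorder list maintaining an explicit stack of (value, has-child) pairs: an incoming element pops the finished subtrees off the stack and leaves are detected at pop time.
import Mathlib
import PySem

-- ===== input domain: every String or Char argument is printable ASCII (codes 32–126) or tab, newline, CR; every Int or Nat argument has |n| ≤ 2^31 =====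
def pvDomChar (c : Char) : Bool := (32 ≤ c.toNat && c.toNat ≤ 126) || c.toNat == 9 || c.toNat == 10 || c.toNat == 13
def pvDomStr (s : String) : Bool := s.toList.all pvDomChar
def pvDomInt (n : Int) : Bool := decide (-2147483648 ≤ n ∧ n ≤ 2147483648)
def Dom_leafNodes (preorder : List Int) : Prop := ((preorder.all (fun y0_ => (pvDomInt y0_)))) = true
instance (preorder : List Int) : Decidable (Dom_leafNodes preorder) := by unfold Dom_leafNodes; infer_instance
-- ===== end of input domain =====

-- B replaces A's recursive segment-splitting (quadratic rescans) with a single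
-- left-to-right pass over the list maintaining an explicit stack; objective: faster.

-- ===== PORT A =====
-- preorder[j] for indices that are in range on every reachable call (A never
-- indexes out of range on the calls it makes, so the default is never returned)
def aget (a : List Int) (j : Nat) : Int := a.getD j 0

-- the inner `while left<n and preorder[start]>preorder[left]: left+=1` loop
def leafWhileF (a : List Int) (v : Int) : Nat → Nat → Nat
  | l, 0 => l
  | l, k + 1 => if l < a.length ∧ v > aget a l then leafWhileF a v (l + 1) k else l

-- the loop runs at most a.length - l times (each step needs l < a.length), so this
-- fuel is never exhausted before the guard fails: the fuelled loop IS the while loop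
def leafWhile (a : List Int) (v : Int) (l : Nat) : Nat := leafWhileF a v l (a.length - l)

-- facts about the while loop that the recursion `leafFunc` needs for termination
theorem leafWhileF_ge (a : List Int) (v : Int) :
    ∀ (k l : Nat), l ≤ leafWhileF a v l k := by
  intro k
  induction k with
  | zero => intro l; exact Nat.le_refl l
  | succ k ih =>
    intro l
    rw [leafWhileF]
    split
    · have := ih (l + 1); omega
    · exact Nat.le_refl l

theorem leafWhile_ge (a : List Int) (v : Int) (l : Nat) : l ≤ leafWhile a v l :=
  leafWhileF_ge a v (a.length - l) l

theorem leafWhileF_le (a : List Int) (v : Int) :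
    ∀ (k l : Nat), l ≤ a.length → leafWhileF a v l k ≤ a.length := by
  intro k
  induction k with
  | zero => intro l hl; exact hl
  | succ k ih =>
    intro l hl
    rw [leafWhileF]
    split
    · next h => exact ih (l + 1) h.1
    · exact hl

theorem leafWhile_le (a : List Int) (v : Int) (l : Nat) (hl : l ≤ a.length) :
    leafWhile a v l ≤ a.length :=
  leafWhileF_le a v (a.length - l) l hl

theorem leafWhileF_stuck (a : List Int) (v : Int) (k l : Nat) (hl : ¬ l < a.length) :
    leafWhileF a v l k = l := by
  cases k with
  | zero => rfl
  | succ k =>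
    rw [leafWhileF]
    split
    · next h => exact absurd h.1 hl
    · rfl

theorem leafWhile_stuck (a : List Int) (v : Int) (l : Nat) (hl : ¬ l < a.length) :
    leafWhile a v l = l :=
  leafWhileF_stuck a v (a.length - l) l hl

theorem leafWhile_adv (a : List Int) (v : Int) (l : Nat) (h : leafWhile a v l ≠ l) :
    l < a.length := by
  by_cases hl : l < a.length
  · exact hl
  · exact absurd (leafWhile_stuck a v l hl) h

theorem leafFunc_dec1 (a : List Int) (v : Int) (s : Nat) {x y : Nat}
    (h : leafWhile a v (s + 1) ≠ s + 1) :
    Prod.Lex (· < ·) (· < ·) (a.length + 1 - (s + 1), x) (a.length + 1 - s, y) := by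
  have h2 : s + 1 < a.length := leafWhile_adv a v (s + 1) h
  exact Prod.Lex.left _ _ (by omega)

theorem leafFunc_dec2 (a : List Int) (v : Int) (s : Nat) (e : Int)
    (h1 : ¬ (s : Int) > e) (h2 : ¬ (s : Int) = e) :
    Prod.Lex (· < ·) (· < ·)
      (a.length + 1 - leafWhile a v (s + 1), (e + 1 - (leafWhile a v (s + 1) : Int)).toNat)
      (a.length + 1 - s, (e + 1 - (s : Int)).toNat) := by
  have hge := leafWhile_ge a v (s + 1)
  by_cases hs : s + 1 ≤ a.length
  · have hle := leafWhile_le a v (s + 1) hs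
    exact Prod.Lex.left _ _ (by omega)
  · have hst : leafWhile a v (s + 1) = s + 1 :=
      leafWhile_stuck a v (s + 1) (by omega)
    by_cases hs2 : s = a.length
    · exact Prod.Lex.left _ _ (by omega)
    · rw [hst]
      have h3 : a.length + 1 - (s + 1) = a.length + 1 - s := by omega
      rw [h3]
      exact Prod.Lex.right _ (by omega)

def leafFunc (a : List Int) (s : Nat) (e : Int) (ans : List Int) : List Int :=
  if (s : Int) > e then ans
  else if (s : Int) = e then ans ++ [aget a s]
  else
    let left := leafWhile a (aget a s) (s + 1)
    let ans1 := if h : left ≠ s + 1 then leafFunc a (s + 1) ((left : Int) - 1) ans else ans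
    leafFunc a left e ans1
termination_by (a.length + 1 - s, (e + 1 - (s : Int)).toNat)
decreasing_by
  · exact leafFunc_dec1 a (aget a s) s h
  · exact leafFunc_dec2 a (aget a s) s e (by omega) (by omega)

def leafNodes (preorder : List Int) : List Int :=
  leafFunc preorder 0 ((preorder.length : Int) - 1) []

-- ===== PORT B =====
-- the inner `while st and st[-1][0] <= x: st.pop(); cnt += 1` loop of Source B
def altPop (st : List (Int × Bool)) (x : Int) (cnt : Nat) : List (Int × Bool) × Nat :=
  match st with
  | [] => ([], cnt)
  | (v, hc) :: rest => if v ≤ x then altPop rest x (cnt + 1) else ((v, hc) :: rest, cnt)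

-- one iteration of Source B's `for x in preorder` loop (state = (stack, ans); stack top first)
def altStep (acc : List (Int × Bool) × List Int) (x : Int) : List (Int × Bool) × List Int :=
  match acc with
  | ([], ans) => ([(x, false)], ans)
  | ((v, hc) :: rest, ans) =>
    if v ≤ x then
      let pr := altPop rest x 1
      ((x, false) :: pr.1, if 1 < pr.2 ∧ hc = false then ans ++ [v] else ans)
    else ((x, false) :: (v, true) :: rest, ans)

def leafNodes_alt (preorder : List Int) : List Int :=
  match preorder.foldl altStep ([], []) with
  | ((v, false) :: _, ans) => ans ++ [v]
  | (_, ans) => ans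

-- ===== PRECONDITION & SPEC =====
def Spec_leafNodes (preorder : List Int) (out : List Int) : Prop := out = leafNodes_alt preorder
instance (preorder : List Int) (out : List Int) : Decidable (Spec_leafNodes preorder out) := by unfold Spec_leafNodes; infer_instance

-- ===== CLAIM (what is proved, stated in full; the proofs are below) =====
def Claim_equal_leafNodes : Prop := ∀ (preorder : List Int), Dom_leafNodes preorder → Spec_leafNodes preorder (leafNodes preorder)

-- ===== LEMMAS AND PROOFS =====

-- The common specification: leaves of the tree a preorder list describes, where the
-- left subtree is the maximal prefix of the tail strictly below the head.
theorem lspec_dec1 (v : Int) (rest : List Int) :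
    (rest.takeWhile (fun y => decide (y < v))).length < (v :: rest).length :=
  Nat.lt_succ_of_le (List.takeWhile_prefix _).length_le

theorem lspec_dec2 (v : Int) (rest : List Int) :
    (rest.dropWhile (fun y => decide (y < v))).length < (v :: rest).length :=
  Nat.lt_succ_of_le (List.dropWhile_suffix _).length_le

def Lspec : List Int → List Int
  | [] => []
  | v :: rest =>
    if rest.isEmpty then [v]
    else Lspec (rest.takeWhile (fun y => decide (y < v)))
         ++ Lspec (rest.dropWhile (fun y => decide (y < v)))
termination_by l => l.length
decreasing_by
  · exact lspec_dec1 v rest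
  · exact lspec_dec2 v rest

-- the segment a[s..e] of the list (e an Int, as in A)
def seg (a : List Int) (s : Nat) (e : Int) : List Int :=
  (a.drop s).take (e + 1 - (s : Int)).toNat

theorem leafWhileF_spec (a : List Int) (v : Int) :
    ∀ (k l : Nat), a.length ≤ l + k →
    leafWhileF a v l k = l + ((a.drop l).takeWhile (fun y => decide (y < v))).length := by
  intro k
  induction k with
  | zero =>
    intro l hk
    rw [leafWhileF, List.drop_eq_nil_iff.mpr (by omega)]
    simp
  | succ k ih =>
    intro l hk
    rw [leafWhileF]
    split
    · next h =>
      have hv : aget a l = a[l] := List.getD_eq_getElem a 0 h.1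
      have hlt : decide (a[l] < v) = true := by
        rw [decide_eq_true_iff, ← hv]; omega
      rw [List.drop_eq_getElem_cons h.1, List.takeWhile_cons, hlt]
      simp only [if_true, List.length_cons]
      rw [ih (l + 1) (by omega)]
      omega
    · next h =>
      by_cases hl : l < a.length
      · have hv : aget a l = a[l] := List.getD_eq_getElem a 0 hl
        have hlt : decide (a[l] < v) = false := by
          rw [decide_eq_false_iff_not, ← hv]
          intro hx; exact h ⟨hl, by omega⟩
        rw [List.drop_eq_getElem_cons hl, List.takeWhile_cons, hlt]
        simp
      · rw [List.drop_eq_nil_iff.mpr (by omega)]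
        simp

theorem leafWhile_spec (a : List Int) (v : Int) (l : Nat) :
    leafWhile a v l = l + ((a.drop l).takeWhile (fun y => decide (y < v))).length :=
  leafWhileF_spec a v (a.length - l) l (by omega)

theorem leafWhileF_mid (a : List Int) (v : Int) :
    ∀ (k l j : Nat), l ≤ j → j < leafWhileF a v l k → j < a.length ∧ aget a j < v := by
  intro k
  induction k with
  | zero => intro l j h1 h2; rw [leafWhileF] at h2; omega
  | succ k ih =>
    intro l j h1 h2
    rw [leafWhileF] at h2
    split at h2
    · next h =>
      by_cases hj : j = l
      · exact hj ▸ ⟨h.1, by omega⟩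
      · exact ih (l + 1) j (by omega) h2
    · omega

theorem leafWhile_mid (a : List Int) (v : Int) (l : Nat) (j : Nat)
    (h1 : l ≤ j) (h2 : j < leafWhile a v l) : j < a.length ∧ aget a j < v :=
  leafWhileF_mid a v (a.length - l) l j h1 h2

theorem leafWhileF_stop (a : List Int) (v : Int) :
    ∀ (k l : Nat), a.length ≤ l + k → leafWhileF a v l k < a.length →
    v ≤ aget a (leafWhileF a v l k) := by
  intro k
  induction k with
  | zero =>
    intro l hk h
    rw [leafWhileF] at h ⊢
    omega
  | succ k ih =>
    intro l hk h
    rw [leafWhileF] at h ⊢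
    split at h
    · next hc =>
      rw [if_pos hc]
      exact ih (l + 1) (by omega) h
    · next hc =>
      rw [if_neg hc]
      by_cases hl : l < a.length
      · by_cases hv : v > aget a l
        · exact absurd ⟨hl, hv⟩ hc
        · omega
      · omega

theorem leafWhile_stop (a : List Int) (v : Int) (l : Nat)
    (h : leafWhile a v l < a.length) : v ≤ aget a (leafWhile a v l) :=
  leafWhileF_stop a v (a.length - l) l (by omega) h

-- A's recursion computes Lspec of the segment, under the invariant that everything
-- in the segment is below the element just past its right end.
theorem funcEq (m : Nat) (a : List Int) (s : Nat) (e : Int) (ans : List Int)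
    (hm : (e + 1 - (s : Int)).toNat ≤ m)
    (he : e ≤ (a.length : Int) - 1)
    (hinv : ∀ j : Nat, s ≤ j → (j : Int) ≤ e → e + 1 < (a.length : Int) →
      aget a j < aget a (e + 1).toNat) :
    leafFunc a s e ans = ans ++ Lspec (seg a s e) := by
  induction m generalizing a s e ans with
  | zero =>
    have hse : (s : Int) > e := by omega
    rw [leafFunc]
    have h0 : (e + 1 - (s : Int)).toNat = 0 := by omega
    simp [hse, seg, h0, Lspec]
  | succ m ih =>
    rw [leafFunc]
    by_cases h1 : (s : Int) > e
    · have h0 : (e + 1 - (s : Int)).toNat = 0 := by omega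
      simp [h1, seg, h0, Lspec]
    · by_cases h2 : (s : Int) = e
      · have hs : s < a.length := by omega
        have h0 : (e + 1 - (s : Int)).toNat = 1 := by omega
        rw [if_neg h1, if_pos h2]
        have hv : aget a s = a[s] := List.getD_eq_getElem a 0 hs
        have ht : (List.drop s a).take 1 = [a[s]] := by
          rw [List.drop_eq_getElem_cons hs]; rfl
        rw [seg, h0, ht, hv]
        simp [Lspec]
      · -- main case: s < e
        rw [if_neg h1, if_neg h2]
        have hse : (s : Int) < e := by omega
        have hs : s < a.length := by omega
        have hv : aget a s = a[s] := List.getD_eq_getElem a 0 hs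
        show leafFunc a (leafWhile a (aget a s) (s + 1)) e
            (if h : leafWhile a (aget a s) (s + 1) ≠ s + 1 then
              leafFunc a (s + 1) ((leafWhile a (aget a s) (s + 1) : Int) - 1) ans else ans)
          = ans ++ Lspec (seg a s e)
        set v := aget a s with hvdef
        set p : Int → Bool := fun y => decide (y < v) with hpdef
        set dl := a.drop (s + 1) with hdl
        set t := dl.take (e - (s : Int)).toNat with htdef
        have hdl_len : dl.length = a.length - (s + 1) := by simp [hdl]
        have ht_len : t.length = (e - (s : Int)).toNat := by
          simp [htdef, hdl_len]; omega
        have hsplit : dl = t ++ a.drop (e + 1).toNat := by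
          have h3 : dl.drop (e - (s : Int)).toNat = a.drop (e + 1).toNat := by
            rw [hdl, List.drop_drop]
            congr 1
            omega
          rw [← h3, htdef, List.take_append_drop]
        set left := leafWhile a v (s + 1) with hleftdef
        have hleft : left = s + 1 + (dl.takeWhile p).length := leafWhile_spec a v (s + 1)
        have hu_nil : List.takeWhile p (a.drop (e + 1).toNat) = [] := by
          by_cases he2 : e + 1 < (a.length : Int)
          · have he3 : (e + 1).toNat < a.length := by omega
            have hinv_s := hinv s (le_refl s) (by omega) he2
            have hvq : aget a (e + 1).toNat = a[(e + 1).toNat] :=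
              List.getD_eq_getElem a 0 he3
            have hq : p a[(e + 1).toNat] = false := by
              rw [hpdef]
              simp only [decide_eq_false_iff_not]
              rw [← hvq]
              omega
            rw [List.drop_eq_getElem_cons he3, List.takeWhile_cons, hq]
            simp
          · rw [List.drop_eq_nil_iff.mpr (by omega)]
            rfl
        have htw : dl.takeWhile p = t.takeWhile p := by
          rw [hsplit, List.takeWhile_append]
          split
          · next hlen =>
              have htt : t.takeWhile p = t :=
                (List.takeWhile_prefix p).eq_of_length hlen
              rw [hu_nil, htt, List.append_nil]
          · rfl
        set k1 := (t.takeWhile p).length with hk1def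
        have hk1 : k1 ≤ (e - (s : Int)).toNat := by
          have := (List.takeWhile_prefix p (l := t)).length_le
          omega
        have hleft2 : left = s + 1 + k1 := by rw [hleft, htw]
        have hseg1 : seg a (s + 1) ((left : Int) - 1) = t.takeWhile p := by
          have harith : ((left : Int) - 1 + 1 - ((s + 1 : Nat) : Int)).toNat = k1 := by
            rw [hleft2]; push_cast; omega
          rw [seg, harith]
          have h5 : dl.takeWhile p = dl.take ((dl.takeWhile p).length) :=
            List.prefix_iff_eq_take.mp (List.takeWhile_prefix p)
          rw [htw] at h5
          show List.take k1 dl = List.takeWhile p t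
          rw [hk1def]
          exact h5.symm
        have hdw : dl.dropWhile p = t.dropWhile p ++ a.drop (e + 1).toNat := by
          apply List.append_cancel_left (as := t.takeWhile p)
          have h4 : t.takeWhile p ++ dl.dropWhile p = dl := by
            rw [← htw]; exact List.takeWhile_append_dropWhile
          rw [h4, hsplit, ← List.append_assoc, List.takeWhile_append_dropWhile]
        have htlen2 : k1 + (t.dropWhile p).length = t.length := by
          have h5 := congrArg List.length (List.takeWhile_append_dropWhile (p := p) (l := t))
          rw [List.length_append] at h5
          rw [hk1def]
          exact h5
        have hseg2 : seg a left e = t.dropWhile p := by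
          have harith : (e + 1 - (left : Int)).toNat = (t.dropWhile p).length := by
            rw [hleft2]; push_cast; omega
          rw [seg, harith]
          have hda : a.drop left = t.dropWhile p ++ a.drop (e + 1).toNat := by
            rw [← hdw]
            have : a.drop left = dl.drop k1 := by
              rw [hdl, List.drop_drop, hleft2]
            rw [this]
            have hdl2 : dl = dl.takeWhile p ++ dl.dropWhile p :=
              List.takeWhile_append_dropWhile.symm
            have hk1' : k1 = (dl.takeWhile p).length := by rw [htw]
            conv_lhs => rw [hdl2]
            rw [hk1', List.drop_left]
          rw [hda, List.take_left]
        have hseg0 : seg a s e = v :: t := by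
          have harith : (e + 1 - (s : Int)).toNat = (e - (s : Int)).toNat + 1 := by omega
          rw [seg, harith, List.drop_eq_getElem_cons hs, List.take_succ_cons, ← hv]
        have htne : ¬ t.isEmpty := by
          rw [List.isEmpty_iff, ← List.length_eq_zero_iff, ht_len]
          omega
        have hLspec : Lspec (seg a s e) = Lspec (t.takeWhile p) ++ Lspec (t.dropWhile p) := by
          rw [hseg0, Lspec, if_neg htne, ← hpdef]
        -- invariant and measure for the right-hand recursive call
        have hleft_le : (left : Int) ≤ e + 1 := by
          rw [hleft2]; push_cast; omega
        have ihR : leafFunc a left e (ans ++ Lspec (t.takeWhile p))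
            = ans ++ Lspec (t.takeWhile p) ++ Lspec (t.dropWhile p) := by
          rw [ih a left e _ (by rw [hleft2]; push_cast; omega) he
            (fun j hj1 hj2 hj3 => hinv j (by omega) hj2 hj3), hseg2]
        have hans1 : (if h : left ≠ s + 1 then
            leafFunc a (s + 1) ((left : Int) - 1) ans else ans)
            = ans ++ Lspec (t.takeWhile p) := by
          by_cases hne : left ≠ s + 1
          · rw [dif_pos hne]
            have hinvL : ∀ j : Nat, s + 1 ≤ j → (j : Int) ≤ (left : Int) - 1 →
                (left : Int) - 1 + 1 < (a.length : Int) →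
                aget a j < aget a ((left : Int) - 1 + 1).toNat := by
              intro j hj1 hj2 hj3
              have harith : ((left : Int) - 1 + 1).toNat = left := by omega
              rw [harith]
              have hjlt : j < left := by omega
              have hm1 := leafWhile_mid a v (s + 1) j hj1 hjlt
              have hm2 := leafWhile_stop a v (s + 1) (by rw [← hleftdef]; omega)
              rw [← hleftdef] at hm2
              omega
            rw [ih a (s + 1) ((left : Int) - 1) ans
              (by rw [hleft2]; push_cast; omega)
              (by omega) hinvL, hseg1]
          · rw [dif_neg hne]
            have hk0 : k1 = 0 := by omega
            have : t.takeWhile p = [] := by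
              rw [← List.length_eq_zero_iff, ← hk1def, hk0]
            rw [this]
            simp [Lspec]
        rw [hans1, ihR, hLspec, List.append_assoc]

theorem A_eq_Lspec (a : List Int) : leafNodes a = Lspec a := by
  have := funcEq a.length a 0 ((a.length : Int) - 1) []
    (by omega) (by omega) (by intro j _ _ h; omega)
  rw [leafNodes, this]
  have : seg a 0 ((a.length : Int) - 1) = a := by
    simp [seg]
  rw [this]
  simp

-- ===== B side =====
-- the leaf still pending on the stack (the childless top), as emitted at the end
def pend : List (Int × Bool) → List Int
  | (u, false) :: _ => [u]
  | _ => []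

theorem altStep_ans (st : List (Int × Bool)) (x : Int) (ans : List Int) :
    altStep (st, ans) x = ((altStep (st, []) x).1, ans ++ (altStep (st, []) x).2) := by
  match st with
  | [] => simp [altStep]
  | (v, hc) :: rest =>
    simp only [altStep]
    split
    · split <;> simp
    · simp

theorem run_ans (xs : List Int) (st : List (Int × Bool)) (ans : List Int) :
    List.foldl altStep (st, ans) xs
      = ((List.foldl altStep (st, []) xs).1, ans ++ (List.foldl altStep (st, []) xs).2) := by
  induction xs generalizing st ans with
  | nil => simp
  | cons x xs ih =>
    simp only [List.foldl_cons]
    rw [altStep_ans st x ans, ih, ih (altStep (st, []) x).1 (altStep (st, []) x).2]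
    simp

theorem altPop_barrier (x w : Int) (b : Bool) (S : List (Int × Bool))
    (T : List (Int × Bool)) (c : Nat) (hw : x < w) :
    altPop (T ++ (w, b) :: S) x c = ((altPop T x c).1 ++ (w, b) :: S, (altPop T x c).2) := by
  induction T generalizing c with
  | nil =>
    have hnot : ¬ w ≤ x := by omega
    simp [altPop, hnot]
  | cons p T ih =>
    obtain ⟨v, hc⟩ := p
    simp only [List.cons_append, altPop]
    split
    · exact ih (c + 1)
    · simp

theorem altPop_all (x : Int) (T : List (Int × Bool)) (c : Nat)
    (h : ∀ p ∈ T, p.1 ≤ x) : altPop T x c = ([], c + T.length) := by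
  induction T generalizing c with
  | nil => simp [altPop]
  | cons p T ih =>
    obtain ⟨v, hc⟩ := p
    have hv : v ≤ x := h (v, hc) (by simp)
    simp only [altPop, if_pos hv]
    rw [ih (c + 1) (fun q hq => h q (by simp [hq]))]
    simp; omega

theorem altStep_barrier (x w : Int) (S : List (Int × Bool)) (T : List (Int × Bool))
    (A : List Int) (hT : T ≠ []) (hw : x < w) :
    altStep (T ++ (w, true) :: S, A) x
      = ((altStep (T, A) x).1 ++ (w, true) :: S, (altStep (T, A) x).2) := by
  match T with
  | [] => exact absurd rfl hT
  | (v, hc) :: rest =>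
    simp only [List.cons_append, altStep]
    split
    · rw [altPop_barrier x w true S rest 1 hw]
      simp
    · simp

theorem altStep_fst_ne (st : List (Int × Bool)) (A : List Int) (x : Int) :
    (altStep (st, A) x).1 ≠ [] := by
  match st with
  | [] => simp [altStep]
  | (v, hc) :: rest =>
    simp only [altStep]
    split
    · simp
    · simp

theorem barrier_run (xs : List Int) (w : Int) (S : List (Int × Bool))
    (T : List (Int × Bool)) (A : List Int) (hT : T ≠ []) (hw : ∀ y ∈ xs, y < w) :
    List.foldl altStep (T ++ (w, true) :: S, A) xs
      = ((List.foldl altStep (T, A) xs).1 ++ (w, true) :: S,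
         (List.foldl altStep (T, A) xs).2) := by
  induction xs generalizing T A with
  | nil => simp
  | cons x xs ih =>
    simp only [List.foldl_cons]
    rw [altStep_barrier x w S T A hT (hw x (by simp))]
    have h2 : altStep (T, A) x = ((altStep (T, A) x).1, (altStep (T, A) x).2) := rfl
    rw [h2]
    exact ih (altStep (T, A) x).1 (altStep (T, A) x).2 (altStep_fst_ne T A x)
      (fun y hy => hw y (by simp [hy]))

theorem start_barrier (xs : List Int) (w : Int) (b : Bool) (S : List (Int × Bool))
    (A : List Int) (hw : ∀ y ∈ xs, y < w) :
    List.foldl altStep ((w, b) :: S, A) xs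
      = ((List.foldl altStep ([], A) xs).1 ++ (w, if xs.isEmpty then b else true) :: S,
         (List.foldl altStep ([], A) xs).2) := by
  match xs with
  | [] => simp
  | x :: xs =>
    have hx : x < w := hw x (by simp)
    simp only [List.foldl_cons, List.isEmpty_cons]
    have hnot : ¬ w ≤ x := by omega
    have h1 : altStep ((w, b) :: S, A) x = ((x, false) :: (w, true) :: S, A) := by
      simp [altStep, hnot]
    have h2 : altStep ([], A) x = ([(x, false)], A) := by simp [altStep]
    rw [h1, h2]
    have := barrier_run xs w S [(x, false)] A (by simp) (fun y hy => hw y (by simp [hy]))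
    simpa using this

theorem step_popall (x u : Int) (hc : Bool) (rest : List (Int × Bool)) (A : List Int)
    (hu : u ≤ x) (hr : ∀ p ∈ rest, p.1 ≤ x) :
    altStep ((u, hc) :: rest, A) x
      = ([(x, false)], A ++ if rest ≠ [] ∧ hc = false then [u] else []) := by
  simp only [altStep, if_pos hu]
  rw [altPop_all x rest 1 hr]
  by_cases h1 : rest = []
  · subst h1; simp
  · have hlen : 0 < rest.length := List.length_pos_iff.mpr h1
    have hc1 : 1 < 1 + rest.length := by omega
    cases hc <;> simp [h1, hc1]

theorem run_fst_ne (xs : List Int) : ∀ (st : List (Int × Bool)) (A : List Int),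
    xs ≠ [] → (List.foldl altStep (st, A) xs).1 ≠ [] := by
  induction xs with
  | nil => intro st A h; exact absurd rfl h
  | cons x xs ih =>
    intro st A _
    simp only [List.foldl_cons]
    have h2 : altStep (st, A) x = ((altStep (st, A) x).1, (altStep (st, A) x).2) := rfl
    by_cases hx : xs = []
    · subst hx
      simp only [List.foldl_nil]
      rw [h2]
      exact altStep_fst_ne st A x
    · rw [h2]
      exact ih _ _ hx

theorem pend_append (SL : List (Int × Bool)) (v : Int) :
    pend (SL ++ [(v, true)]) = pend SL := by
  match SL with
  | [] => rfl
  | (u, hb) :: r => cases hb <;> simp [pend]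

-- B's fold computes Lspec up to the pending top-of-stack leaf
theorem mainB (m : Nat) (xs : List Int) (hm : xs.length ≤ m) (hne : xs ≠ []) :
    Lspec xs = (List.foldl altStep ([], []) xs).2 ++ pend (List.foldl altStep ([], []) xs).1
    ∧ (∀ p ∈ (List.foldl altStep ([], []) xs).1, p.1 ∈ xs) := by
  induction m generalizing xs with
  | zero =>
    exact absurd (List.length_eq_zero_iff.mp (by omega)) hne
  | succ m ih =>
    match xs, hne with
    | v :: rest, _ =>
    by_cases hr0 : rest = []
    · subst hr0
      refine ⟨?_, ?_⟩
      · simp [altStep, pend, Lspec]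
      · intro q hq
        simp [altStep] at hq
        simp [hq]
    · set p : Int → Bool := fun y => decide (y < v) with hpdef
      set lt := rest.takeWhile p with hltdef
      set ge := rest.dropWhile p with hgedef
      have hsplit : lt ++ ge = rest := List.takeWhile_append_dropWhile
      have hltv : ∀ y ∈ lt, y < v := by
        intro y hy
        have := List.mem_takeWhile_imp (hltdef ▸ hy)
        rw [hpdef] at this
        exact of_decide_eq_true this
      have hlt_len : lt.length ≤ rest.length :=
        (List.takeWhile_prefix p (l := rest)).length_le
      have hrest_len : rest.length ≤ m := by simp at hm; omega
      have hstep0 : List.foldl altStep (([] : List (Int × Bool)), ([] : List Int)) (v :: rest)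
          = List.foldl altStep ([(v, false)], []) rest := rfl
      set SL := (List.foldl altStep (([] : List (Int × Bool)), ([] : List Int)) lt).1 with hSL
      set EL := (List.foldl altStep (([] : List (Int × Bool)), ([] : List Int)) lt).2 with hEL
      have hL : List.foldl altStep ([(v, false)], []) lt
          = (SL ++ [(v, if lt.isEmpty then false else true)], EL) := by
        rw [start_barrier lt v false [] [] hltv]
      have hSLlt : SL = [] → lt = [] := by
        intro h
        by_contra hc
        exact run_fst_ne lt [] [] hc (hSL ▸ h)
      have hSLmem : ∀ q ∈ SL, q.1 ∈ lt := by
        intro q hq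
        by_cases hlt0 : lt = []
        · rw [hlt0] at hSL
          simp at hSL
          rw [hSL] at hq
          simp at hq
        · exact ((ih lt (by omega) hlt0).2) q hq
      rcases hgecase : ge with _ | ⟨g, ge'⟩
      · -- ge = [] : the whole tail is the left subtree
        have hltr : lt = rest := by rw [hgecase] at hsplit; simpa using hsplit
        have hfin : List.foldl altStep ([], []) (v :: rest)
            = (SL ++ [(v, true)], EL) := by
          rw [hstep0, ← hltr, hL]
          have h5 : lt.isEmpty = false := by
            rw [hltr]
            cases rest with
            | nil => exact absurd rfl hr0
            | cons a l => rfl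
          rw [h5]
          simp
        have hIH := ih lt (by omega) (by rw [hltr]; exact hr0)
        have hLs : Lspec (v :: rest) = Lspec lt := by
          rw [Lspec, if_neg (by simp [List.isEmpty_iff, hr0])]
          rw [← hpdef, ← hltdef, ← hgedef, hgecase]
          simp [Lspec]
        refine ⟨?_, ?_⟩
        · rw [hfin, hLs]
          show Lspec lt = EL ++ pend (SL ++ [(v, true)])
          rw [pend_append, hIH.1]
        · rw [hfin]
          intro q hq
          simp only [List.mem_append] at hq
          rcases hq with hq | hq
          · have := hSLmem q hq
            rw [hltr] at this
            simp [this]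
          · simp at hq
            simp [hq]
      · -- ge = g :: ge' : g closes the left subtree of v
        have hvg : v ≤ g := by
          have hdwc : List.dropWhile p rest = g :: ge' := by rw [← hgedef]; exact hgecase
          have hh := List.head?_dropWhile_not p rest
          rw [hdwc] at hh
          simp only [List.head?_cons, hpdef, decide_eq_false_iff_not] at hh
          omega
        have hvals : ∀ q ∈ SL, q.1 ≤ g := by
          intro q hq
          have := hltv q.1 (hSLmem q hq)
          omega
        have hstepg : altStep (SL ++ [(v, if lt.isEmpty then false else true)], EL) g
            = ([(g, false)], Lspec lt) := by
          rcases hSL0 : SL with _ | ⟨⟨u, hb⟩, r⟩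
          · have hlt0 : lt = [] := hSLlt hSL0
            have hEL0 : EL = [] := by rw [hlt0] at hEL; simpa using hEL
            rw [List.nil_append]
            rw [step_popall g v _ [] EL hvg (by simp)]
            simp [hEL0, hlt0, Lspec]
          · have hlt0 : lt ≠ [] := by
              intro h
              have h2 : SL = [] := by rw [hSL, h]; rfl
              rw [h2] at hSL0
              simp at hSL0
            have hu : u ≤ g := hvals (u, hb) (by rw [hSL0]; simp)
            have hrr : ∀ q ∈ r ++ [(v, if lt.isEmpty then false else true)], q.1 ≤ g := by
              intro q hq
              simp only [List.mem_append] at hq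
              rcases hq with hq | hq
              · exact hvals q (by rw [hSL0]; simp [hq])
              · simp at hq; rw [hq]; exact hvg
            rw [List.cons_append]
            rw [step_popall g u hb _ EL hu hrr]
            have hIH := ih lt (by omega) hlt0
            have hpends : (if r ++ [(v, if lt.isEmpty then false else true)] ≠ [] ∧ hb = false
                then [u] else []) = pend SL := by
              rw [hSL0]
              cases hb <;> simp [pend]
            rw [hpends, ← hIH.1]
        have hfold : List.foldl altStep ([], []) (v :: rest)
            = ((List.foldl altStep ([], []) ge).1,
               Lspec lt ++ (List.foldl altStep ([], []) ge).2) := by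
          rw [hstep0, ← hsplit, List.foldl_append, hL, hgecase]
          simp only [List.foldl_cons]
          rw [hstepg]
          have hg2 : altStep (([] : List (Int × Bool)), ([] : List Int)) g
              = ([(g, false)], []) := rfl
          rw [hg2, run_ans ge' [(g, false)] (Lspec lt), run_ans ge' [(g, false)] []]
        have hgelen : ge.length ≤ m := by
          have := (List.dropWhile_suffix p (l := rest)).length_le
          simp only [← hgedef] at this
          omega
        have hIHge := ih ge hgelen (by rw [hgecase]; simp)
        have hLs : Lspec (v :: rest) = Lspec lt ++ Lspec ge := by
          rw [Lspec, if_neg (by simp [List.isEmpty_iff, hr0])]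
        refine ⟨?_, ?_⟩
        · rw [hLs, hfold]
          show Lspec lt ++ Lspec ge
            = Lspec lt ++ (List.foldl altStep ([], []) ge).2
              ++ pend (List.foldl altStep ([], []) ge).1
          rw [hIHge.1, ← List.append_assoc]
        · rw [hfold]
          intro q hq
          have hq2 : q ∈ (List.foldl altStep ([], []) ge).1 := hq
          have hsub : ge ⊆ rest := (List.dropWhile_suffix p (l := rest)).subset
          exact List.mem_cons_of_mem v (hsub (hIHge.2 q hq2))

theorem B_eq_Lspec (a : List Int) : leafNodes_alt a = Lspec a := by
  match ha : a with
  | [] => simp [leafNodes_alt, Lspec]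
  | x :: xs =>
    obtain ⟨h1, _⟩ := mainB a.length a (by omega) (by simp [ha])
    rw [leafNodes_alt, ← ha, h1]
    rcases hst : (List.foldl altStep ([], []) a).1 with _ | ⟨⟨u, hc⟩, r⟩
    · simp [pend]
      rcases h : List.foldl altStep ([], []) a with ⟨st, ans⟩
      simp [h] at hst ⊢
      simp [hst]
    · rcases h : List.foldl altStep ([], []) a with ⟨st, ans⟩
      simp [h] at hst ⊢
      rw [hst]
      cases hc <;> simp [pend]

-- ===== VERDICT (by name: the statement is the Claim_ definition above) =====
theorem leafNodes_spec : Claim_equal_leafNodes := by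
  intro preorder _
  unfold Spec_leafNodes
  rw [A_eq_Lspec, B_eq_Lspec]
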